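-- pv_equiv track=rewrite | github.com/MyK00L/tategakifont | main.py | table_at
-- ===== SOURCE A (Python) =====
-- def table_at(table, code):
--     lb = -1
--     ub = len(table)
--     while lb<ub-1:
--         m = (lb+ub)//2
--         if table[m][0][0] <= code:
--             lb = m
--         else:
--             ub = m
--     if table[lb][0][0] <= code and code <= table[lb][0][1]:
--         return table[lb][1]
--     return "None"
-- ===== SOURCE B (Python) =====
-- def table_at(table, code):
--     # Precompute the list of lower bounds, then recursively bisect over
--     # shifted positions 0..len(table): table index = position - 1.
--     lows = [low for (low, _high), _name in table]
--
--     def go(lo, hi):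
--         if hi - lo <= 1:
--             return lo
--         mid = (lo + hi) // 2
--         return go(mid, hi) if lows[mid - 1] <= code else go(lo, mid)
--
--     pos = go(0, len(table) + 1)
--     (low, high), name = table[pos - 1]
--     return name if low <= code <= high else "None"
-- ===== Notes on version B (the rewrite author's own statement) =====
-- stated objective: alternative
-- what changed: B first projects the table to a plain list of lower bounds, then runs a recursive bisection over shifted nonnegative positions 0..len(table) (table index = position-1) instead of A's iterative while-loop on the signed (lb, ub) pair, and finishes with the same containment check by destructuring the located entry.
import Mathlib
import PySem

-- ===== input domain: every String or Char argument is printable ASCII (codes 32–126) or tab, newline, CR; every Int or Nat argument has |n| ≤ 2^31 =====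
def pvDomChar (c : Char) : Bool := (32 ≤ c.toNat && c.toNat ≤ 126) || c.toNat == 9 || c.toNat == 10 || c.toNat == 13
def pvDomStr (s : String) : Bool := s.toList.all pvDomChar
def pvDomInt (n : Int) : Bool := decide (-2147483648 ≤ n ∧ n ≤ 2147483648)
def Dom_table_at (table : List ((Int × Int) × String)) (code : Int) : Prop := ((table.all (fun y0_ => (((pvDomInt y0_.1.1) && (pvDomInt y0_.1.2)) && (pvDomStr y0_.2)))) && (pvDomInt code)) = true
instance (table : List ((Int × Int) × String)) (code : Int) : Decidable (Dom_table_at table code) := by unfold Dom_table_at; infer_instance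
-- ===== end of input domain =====

-- B projects the table to a list of lower bounds and bisects it recursively over shifted nonnegative positions, instead of A's iterative while-loop on signed (lb, ub) bounds; return values proved equal on nonempty tables (both Pythons raise IndexError on []).


-- ===== PORT A =====
-- A's while loop over the signed state (lb, ub); table[m] via pyGet? (m is in range while looping, so the default is never read).
def pvLoopA (table : List ((Int × Int) × String)) (code : Int) (lb ub : Int) : Int :=
  if lb < ub - 1 then
    let m := PySem.Int.floordiv (lb + ub) 2
    if ((PySem.List.pyGet? table m).getD (((0 : Int), (0 : Int)), "")).1.1 ≤ code then
      pvLoopA table code m ub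
    else
      pvLoopA table code lb m
  else lb
termination_by (ub - lb).toNat
decreasing_by
  all_goals
    have h2 : (0:Int) < 2 := by omega
    rw [PySem.Int.floordiv_eq_ediv_of_pos h2] at *
    omega

def table_at (table : List ((Int × Int) × String)) (code : Int) : String :=
  let lb := pvLoopA table code (-1) (table.length : Int)
  let e := (PySem.List.pyGet? table lb).getD (((0 : Int), (0 : Int)), "")
  if e.1.1 ≤ code ∧ code ≤ e.1.2 then e.2 else "None"

-- ===== PORT B =====
-- B's recursive bisection of the projected lower-bound list over shifted Nat positions.
def pvGo (lows : List Int) (code : Int) (lo hi : Nat) : Nat :=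
  if hi - lo ≤ 1 then lo
  else
    let mid := (lo + hi) / 2
    if lows.getD (mid - 1) 0 ≤ code then pvGo lows code mid hi else pvGo lows code lo mid
termination_by hi - lo
decreasing_by all_goals omega

def table_at_alt (table : List ((Int × Int) × String)) (code : Int) : String :=
  let lows := table.map (fun e => e.1.1)
  let pos := pvGo lows code 0 (table.length + 1)
  match (PySem.List.pyGet? table ((pos : Int) - 1)).getD (((0 : Int), (0 : Int)), "") with
  | ((low, high), name) => if low ≤ code ∧ code ≤ high then name else "None"

-- ===== PRECONDITION & SPEC =====
-- Pre_ excludes only the empty table, on which A (and B) raise IndexError at table[-1].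
def Pre_table_at (table : List ((Int × Int) × String)) (code : Int) : Prop := table ≠ []
instance (table : List ((Int × Int) × String)) (code : Int) : Decidable (Pre_table_at table code) := by unfold Pre_table_at; infer_instance
def pvWitness_table_at : (List ((Int × Int) × String)) × Int := ([((65, 90), "upper")], 70)

def Spec_table_at (table : List ((Int × Int) × String)) (code : Int) (out : String) : Prop := out = table_at_alt table code
instance (table : List ((Int × Int) × String)) (code : Int) (out : String) : Decidable (Spec_table_at table code out) := by unfold Spec_table_at; infer_instance

-- ===== CLAIM (what is proved, stated in full; the proofs are below) =====
def Claim_equal_table_at : Prop := ∀ (table : List ((Int × Int) × String)) (code : Int), Dom_table_at table code → Pre_table_at table code → Spec_table_at table code (table_at table code)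

-- ===== LEMMAS AND PROOFS =====

-- A's loop at signed bounds (lo-1, hi-1) visits exactly the entries B's bisection probes at
-- shifted positions (lo, hi): the midpoints differ by the constant shift 1.
theorem loop_eq_go (table : List ((Int × Int) × String)) (code : Int) :
    ∀ (n : Nat) (lo hi : Nat), hi - lo = n → lo < hi → hi ≤ table.length + 1 →
      pvLoopA table code ((lo : Int) - 1) ((hi : Int) - 1) =
        (pvGo (table.map (fun e => e.1.1)) code lo hi : Int) - 1 := by
  intro n
  induction n using Nat.strong_induction_on with
  | _ n ih =>
    intro lo hi hn hlt hub
    rw [pvLoopA, pvGo]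
    have h2 : (0:Int) < 2 := by omega
    by_cases hs : hi - lo ≤ 1
    · simp [hs, show ¬ ((lo:Int) - 1 < (hi:Int) - 1 - 1) by omega]
    · have hmid1 : lo + 1 ≤ (lo + hi) / 2 := by omega
      have hmid2 : (lo + hi) / 2 + 1 ≤ hi := by omega
      have hm : PySem.Int.floordiv (((lo:Int) - 1) + ((hi:Int) - 1)) 2 =
          (((lo + hi) / 2 : Nat) : Int) - 1 := by
        rw [PySem.Int.floordiv_eq_ediv_of_pos h2]
        omega
      have hidx : ((((lo + hi) / 2 : Nat) : Int) - 1) = (((lo + hi) / 2 - 1 : Nat) : Int) := by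
        omega
      have hrange : (lo + hi) / 2 - 1 < table.length := by omega
      have hprobe : ((PySem.List.pyGet? table ((((lo + hi) / 2 : Nat) : Int) - 1)).getD
            (((0 : Int), (0 : Int)), "")).1.1 =
          (table.map (fun e => e.1.1)).getD ((lo + hi) / 2 - 1) 0 := by
        rw [hidx, PySem.List.pyGet?_natCast]
        simp [List.getD_eq_getElem?_getD, List.getElem?_map,
          List.getElem?_eq_getElem hrange]
      simp only [hs, if_false, show ((lo:Int) - 1 < (hi:Int) - 1 - 1) by omega, if_true, hm,
        hprobe]
      split
      · have := ih (hi - (lo + hi) / 2) (by omega) ((lo + hi) / 2) hi rfl (by omega) hub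
        simpa using this
      · have := ih ((lo + hi) / 2 - lo) (by omega) lo ((lo + hi) / 2) rfl (by omega) (by omega)
        simpa using this

-- ===== VERDICT (by name: the statement is the Claim_ definition above) =====
theorem table_at_spec : Claim_equal_table_at := by
  intro table code _ hne
  unfold Spec_table_at table_at table_at_alt
  have hlen : 0 < table.length := List.length_pos_iff.mpr hne
  have h := loop_eq_go table code (table.length + 1) 0 (table.length + 1) rfl (by omega) (by omega)
  simp only [Nat.cast_zero, Nat.cast_add, Nat.cast_one] at h
  rw [show (-1 : Int) = (0:Int) - 1 by ring,
      show ((table.length : Int)) = ((table.length : Int) + 1) - 1 by ring, h]
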